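-- pv_equiv track=rewrite | github.com/henrikkirchmann/Control-Flow-Reconstruction | evaluation.py | get_eventual_follows_relations_between_activities_dict
-- ===== SOURCE A (Python) =====
-- from collections import defaultdict
--
-- def get_eventual_follows_relations_between_activities_dict(log, alphabet):
--     # 0 = Never Follows
--     # 1 = Sometimes Follows
--     # 2 = Always Follows
--     # 3 = Initialize
--     # eventual_follows_relations_dict[a][b] = 2 --> b does always eventual follow a
--     eventual_follows_relations_dict = defaultdict(lambda: defaultdict(int))
--     for a in alphabet:
--         for b in alphabet:
--             eventual_follows_relations_dict[a][b] = 3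
--
--     saw_activity_before_dict = defaultdict()
--     for activity in alphabet:
--         saw_activity_before_dict[activity] = False
--
--     for trace in log:
--         i = 0
--         trace_len = len(trace)
--         for activity in trace:
--             if i != trace_len:
--                 following_activities_set = set()
--                 for following_activitiy in trace[i + 1:]:
--                     following_activities_set.add(following_activitiy)
--                     #when we see a eventual_follows relation, change relation based on observed relation before
--                     if eventual_follows_relations_dict[activity][following_activitiy] == 0:
--                         eventual_follows_relations_dict[activity][following_activitiy] = 1
--                     #elif eventual_follows_relations_dict[activity][following_activitiy] == 1 & 2 --> nothing todo
--                     elif eventual_follows_relations_dict[activity][following_activitiy] == 3: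
--                         eventual_follows_relations_dict[activity][following_activitiy] = 2
--                 for key in eventual_follows_relations_dict[activity].keys():
--                     # change the initialized value to never follows for all relations we have not seen when seeing an activity for the first time
--                     if eventual_follows_relations_dict[activity][key] == 3:
--                         eventual_follows_relations_dict[activity][key] = 0
--                     # change all always follow relations to sometimes follow relations of relations that did not happen in this trace but are classified as always follow realtions
--                     elif eventual_follows_relations_dict[activity][key] == 2:
--                         if key not in following_activities_set:
--                             eventual_follows_relations_dict[activity][key] == 1
--             i += 1
--     return {k: dict(v) for k, v in
--             eventual_follows_relations_dict.items()}  # Convert inner defaultdicts to regular dicts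
-- ===== SOURCE B (Python) =====
-- def get_eventual_follows_relations_between_activities_dict(log, alphabet):
--     # 0 = never follows, 1 = sometimes follows, 2 = always follows,
--     # 3 = activity never observed in the log
--     relations = {a: {b: 3 for b in alphabet} for a in alphabet}
--     for trace in log:
--         first_pos = {}
--         for i, activity in enumerate(trace):
--             if activity not in first_pos:
--                 first_pos[activity] = i
--         # a repeated activity's later suffixes are subsets of its first one,
--         # so one scan from the first occurrence sees every follows relation
--         for activity, start in first_pos.items():
--             row = relations.setdefault(activity, {})
--             for b in trace[start + 1:]:
--                 v = row.get(b, 0)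
--                 if v == 0:
--                     row[b] = 1
--                 elif v == 3:
--                     row[b] = 2
--             for b, v in row.items():
--                 if v == 3:
--                     row[b] = 0
--     return relations
-- ===== Notes on version B (the rewrite author's own statement) =====
-- stated objective: alternative
-- what changed: A rescans the suffix after every single event and re-sweeps the activity's whole row per event; B computes each activity's first position per trace once and does one suffix scan plus one row sweep per distinct activity per trace (later occurrences' suffixes are subsets of the first, so they add nothing), building the same 0/1/2/3 table.
import Mathlib
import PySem

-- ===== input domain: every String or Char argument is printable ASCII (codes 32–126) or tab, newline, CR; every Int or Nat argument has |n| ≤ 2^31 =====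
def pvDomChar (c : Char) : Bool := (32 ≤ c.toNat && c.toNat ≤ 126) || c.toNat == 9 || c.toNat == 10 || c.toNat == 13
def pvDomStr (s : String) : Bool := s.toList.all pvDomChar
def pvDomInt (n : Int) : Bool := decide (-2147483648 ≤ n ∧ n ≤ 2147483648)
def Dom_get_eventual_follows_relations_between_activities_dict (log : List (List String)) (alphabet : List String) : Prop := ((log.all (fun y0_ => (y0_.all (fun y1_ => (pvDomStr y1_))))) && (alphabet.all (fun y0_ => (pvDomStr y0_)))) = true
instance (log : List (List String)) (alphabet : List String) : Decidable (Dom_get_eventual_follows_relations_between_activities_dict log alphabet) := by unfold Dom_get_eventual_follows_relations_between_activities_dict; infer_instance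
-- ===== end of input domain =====

-- B replaces A's per-event suffix scan + per-event full-row sweep by one suffix scan and one
-- sweep per distinct activity per trace (later occurrences of an activity add no information);
-- objective: alternative (fewer scans on repeat-heavy traces, same table).


-- ===== PORT A =====
-- defaultdict read `rel[a][f]`: materializes the row and the entry (inner default 0) if missing
def pvARead (D : PySem.Dict String (PySem.Dict String Int)) (a f : String) :
    Int × PySem.Dict String (PySem.Dict String Int) :=
  let row := D.getD a PySem.Dict.empty
  let v := row.getD f 0
  (v, D.insert a (row.insert f v))

-- `rel[a][f] = v` (the outer defaultdict access materializes the row if missing)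
def pvAWrite (D : PySem.Dict String (PySem.Dict String Int)) (a f : String) (v : Int) :
    PySem.Dict String (PySem.Dict String Int) :=
  D.insert a ((D.getD a PySem.Dict.empty).insert f v)

-- body of `for following_activitiy in trace[i + 1:]` (threads (following_activities_set, dict))
def pvASufStep (activity : String)
    (q : PySem.Set String × PySem.Dict String (PySem.Dict String Int)) (f : String) :
    PySem.Set String × PySem.Dict String (PySem.Dict String Int) :=
  let S := PySem.Set.add q.1 f
  let r := pvARead q.2 activity f
  if r.1 == 0 then (S, pvAWrite r.2 activity f 1)
  else if r.1 == 3 then (S, pvAWrite r.2 activity f 2)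
  else (S, r.2)

-- body of `for key in eventual_follows_relations_dict[activity].keys()`
def pvASweepStep (activity : String) (S : PySem.Set String)
    (D : PySem.Dict String (PySem.Dict String Int)) (key : String) :
    PySem.Dict String (PySem.Dict String Int) :=
  let v := (D.getD activity PySem.Dict.empty).getD key 0
  if v == 3 then pvAWrite D activity key 0
  else if v == 2 then
    -- source line is `... == 1`: a comparison, not an assignment — no state change
    (if PySem.Set.contains S key then D else D)
  else D

-- body of `for activity in trace` (state = (i, dict))
def pvAEvent (trace : List String)
    (st : Int × PySem.Dict String (PySem.Dict String Int)) (activity : String) :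
    Int × PySem.Dict String (PySem.Dict String Int) :=
  let i := st.1
  let D := st.2
  let D :=
    if i ≠ PySem.List.len trace then
      let q := (PySem.List.slice trace (some (i + 1)) none).foldl (pvASufStep activity)
        (PySem.Set.empty, D)
      let S := q.1
      let D := q.2
      let row := D.getD activity PySem.Dict.empty   -- `rel[activity].keys()` materializes the row
      let D := D.insert activity row
      row.keys.foldl (pvASweepStep activity S) D
    else D
  (i + 1, D)

-- body of `for trace in log`
def pvATrace (D0 : PySem.Dict String (PySem.Dict String Int)) (trace : List String) :
    PySem.Dict String (PySem.Dict String Int) :=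
  (trace.foldl (pvAEvent trace) (0, D0)).2

def get_eventual_follows_relations_between_activities_dict (log : List (List String)) (alphabet : List String) : List (String × List (String × Int)) :=
  let D0 := alphabet.foldl (fun D a => alphabet.foldl (fun D b => pvAWrite D a b 3) D)
    (PySem.Dict.empty : PySem.Dict String (PySem.Dict String Int))
  let _saw := alphabet.foldl (fun (d : PySem.Dict String Bool) act => d.insert act false)
    PySem.Dict.empty   -- `saw_activity_before_dict`: built and never read
  let Df := log.foldl pvATrace D0
  Df.items.map (fun p => (p.1, p.2.items))

-- ===== PORT B =====
-- body of `for b in trace[start + 1:]`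
def pvBRowStep (row : PySem.Dict String Int) (b : String) : PySem.Dict String Int :=
  let v := row.getD b 0
  if v == 0 then row.insert b 1
  else if v == 3 then row.insert b 2
  else row

-- body of `for b, v in row.items()`
def pvBSweepStep (row : PySem.Dict String Int) (q : String × Int) : PySem.Dict String Int :=
  if q.2 == 3 then row.insert q.1 0 else row

-- body of `for trace in log`
def pvBTrace (rel : PySem.Dict String (PySem.Dict String Int)) (trace : List String) :
    PySem.Dict String (PySem.Dict String Int) :=
  let first_pos := (PySem.List.enumerate trace).foldl
    (fun (d : PySem.Dict String Int) q => if d.contains q.2 then d else d.insert q.2 q.1)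
    PySem.Dict.empty
  first_pos.items.foldl (fun rel p =>
    let activity := p.1
    let rel := rel.setdefault activity PySem.Dict.empty
    let row := rel.getD activity PySem.Dict.empty
    let row := (PySem.List.slice trace (some (p.2 + 1)) none).foldl pvBRowStep row
    let row := row.items.foldl pvBSweepStep row
    rel.insert activity row) rel

def get_eventual_follows_relations_between_activities_dict_alt (log : List (List String)) (alphabet : List String) : List (String × List (String × Int)) :=
  let relations := alphabet.foldl
    (fun (rel : PySem.Dict String (PySem.Dict String Int)) a =>
      rel.insert a (alphabet.foldl (fun (r : PySem.Dict String Int) b => r.insert b 3)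
        PySem.Dict.empty))
    PySem.Dict.empty
  let relations := log.foldl pvBTrace relations
  relations.items.map (fun p => (p.1, p.2.items))

-- ===== PRECONDITION & SPEC =====
def Spec_get_eventual_follows_relations_between_activities_dict (log : List (List String)) (alphabet : List String) (out : List (String × List (String × Int))) : Prop := out = get_eventual_follows_relations_between_activities_dict_alt log alphabet
instance (log : List (List String)) (alphabet : List String) (out : List (String × List (String × Int))) : Decidable (Spec_get_eventual_follows_relations_between_activities_dict log alphabet out) := by unfold Spec_get_eventual_follows_relations_between_activities_dict; infer_instance

-- ===== CLAIM (what is proved, stated in full; the proofs are below) =====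
def Claim_equal_get_eventual_follows_relations_between_activities_dict : Prop := ∀ (log : List (List String)) (alphabet : List String), Dom_get_eventual_follows_relations_between_activities_dict log alphabet → Spec_get_eventual_follows_relations_between_activities_dict log alphabet (get_eventual_follows_relations_between_activities_dict log alphabet)

-- ===== LEMMAS AND PROOFS =====

abbrev pvRel := PySem.Dict String (PySem.Dict String Int)

-- inserting a key's own current value is a no-op (keys unique)
theorem pvInsertSelf {v2 : Type} (d : PySem.Dict String v2) (k : String) (v : v2)
    (h : d.get? k = some v) (hn : d.keys.Nodup) : d.insert k v = d := by
  apply PySem.Dict.ext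
  have hc : d.contains k = true := by
    rw [PySem.Dict.contains_eq_isSome_get?, h]; rfl
  rw [PySem.Dict.items_insert_of_contains _ _ hc]
  have : ∀ p ∈ d.items, (if p.1 == k then (k, v) else p) = p := by
    intro p hp
    obtain ⟨pk, pv⟩ := p
    by_cases hk : pk = k
    · subst hk
      have h2 := PySem.Dict.get?_of_mem_items d hp hn
      rw [h] at h2
      simp [Option.some_inj.mp h2]
    · simp [hk]
  rw [List.map_congr_left this]
  simp

theorem pvInsertGetDSelf {v2 : Type} (d : PySem.Dict String v2) (k : String) (dflt : v2)
    (hc : d.contains k = true) (hn : d.keys.Nodup) : d.insert k (d.getD k dflt) = d := by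
  have h : (d.get? k).isSome := by rw [← PySem.Dict.contains_eq_isSome_get?, hc]
  obtain ⟨v, hv⟩ := Option.isSome_iff_exists.mp h
  rw [PySem.Dict.getD_eq_get?_getD, hv]
  exact pvInsertSelf d k v hv hn

-- a fold whose every step preserves P preserves P
theorem pvFoldPres {s a2 : Type} (P : s → Prop) (g : s → a2 → s)
    (h : ∀ st x, P st → P (g st x)) : ∀ (l : List a2) (st : s), P st → P (l.foldl g st) := by
  intro l
  induction l with
  | nil => intro st hs; exact hs
  | cons x xs ih => intro st hs; exact ih _ (h st x hs)

-- row invariant: unique keys, values among the four states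
def pvRowOK (r : PySem.Dict String Int) : Prop :=
  r.keys.Nodup ∧ ∀ b, r.getD b 0 = 0 ∨ r.getD b 0 = 1 ∨ r.getD b 0 = 2 ∨ r.getD b 0 = 3

def pvInv (D : pvRel) : Prop :=
  D.keys.Nodup ∧ ∀ a, pvRowOK (D.getD a PySem.Dict.empty)

-- abbreviations for B's loop pieces
def pvRowAfter (l : List String) (r : PySem.Dict String Int) : PySem.Dict String Int :=
  l.foldl pvBRowStep r

def pvSweep (r : PySem.Dict String Int) : PySem.Dict String Int :=
  r.items.foldl pvBSweepStep r

def pvSweepK (ks : List String) (r : PySem.Dict String Int) : PySem.Dict String Int :=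
  ks.foldl (fun r k => if r.getD k 0 == 3 then r.insert k 0 else r) r

-- both programs' net effect of one processed occurrence (activity, index)
def pvStepP (trace : List String) (D : pvRel) (p : String × Int) : pvRel :=
  D.insert p.1 (pvSweep (pvRowAfter (PySem.List.slice trace (some (p.2 + 1)) none)
    (D.getD p.1 PySem.Dict.empty)))

-- first occurrences (value = index) of a pair list, in order, keys not in seen
def pvFirstNew : List (Int × String) → List String → List (String × Int)
  | [], _ => []
  | (i, a) :: ps, seen =>
      if a ∈ seen then pvFirstNew ps seen else (a, i) :: pvFirstNew ps (seen ++ [a])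

theorem pvRowStepNodup (r : PySem.Dict String Int) (b : String) (h : r.keys.Nodup) :
    (pvBRowStep r b).keys.Nodup := by
  simp only [pvBRowStep]
  split_ifs <;> first | exact PySem.Dict.nodup_keys_insert _ _ _ h | exact h

theorem pvRowAfterNodup (l : List String) (r : PySem.Dict String Int) (h : r.keys.Nodup) :
    (pvRowAfter l r).keys.Nodup :=
  pvFoldPres (fun r => r.keys.Nodup) _ (fun r b => pvRowStepNodup r b) l r h

theorem pvSweepNodup (r : PySem.Dict String Int) (h : r.keys.Nodup) :
    (pvSweep r).keys.Nodup := by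
  unfold pvSweep
  refine pvFoldPres (fun r => r.keys.Nodup) _ ?_ r.items r h
  intro st q hs
  simp only [pvBSweepStep]
  split_ifs <;> first | exact PySem.Dict.nodup_keys_insert _ _ _ hs | exact hs

-- A's suffix loop, started from an insert-normal-form state, is B's row loop
theorem pvASufStepEq (a f : String) (S : PySem.Set String) (D : pvRel)
    (r : PySem.Dict String Int) (hr : r.keys.Nodup) :
    pvASufStep a (S, D.insert a r) f = (PySem.Set.add S f, D.insert a (pvBRowStep r f)) := by
  simp only [pvASufStep, pvARead, pvAWrite, pvBRowStep,
    PySem.Dict.getD_insert_self, PySem.Dict.insert_insert_self]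
  by_cases h0 : r.getD f 0 = 0
  · simp [h0]
  · by_cases h3 : r.getD f 0 = 3
    · simp [h3]
    · have hp : r.get? f = some (r.getD f 0) := by
        cases hq : r.get? f with
        | none =>
          exact absurd (by rw [PySem.Dict.getD_eq_get?_getD, hq]; rfl) h0
        | some v => rw [PySem.Dict.getD_eq_get?_getD, hq]; rfl
      simp [h0, h3, pvInsertSelf r f _ hp hr]

theorem pvSufFactor (a : String) (l : List String) :
    ∀ (S : PySem.Set String) (D : pvRel) (r : PySem.Dict String Int), r.keys.Nodup →
    (l.foldl (pvASufStep a) (S, D.insert a r)).2 = D.insert a (pvRowAfter l r) := by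
  induction l with
  | nil => intro S D r hr; simp [pvRowAfter]
  | cons f l ih =>
    intro S D r hr
    rw [List.foldl_cons, pvASufStepEq a f S D r hr,
      ih _ D (pvBRowStep r f) (pvRowStepNodup r f hr)]
    simp [pvRowAfter]

-- A's key sweep, started from an insert-normal-form state, factors
theorem pvSweepAFactor (a : String) (S : PySem.Set String) (ks : List String) :
    ∀ (D : pvRel) (r : PySem.Dict String Int),
    ks.foldl (pvASweepStep a S) (D.insert a r) = D.insert a (pvSweepK ks r) := by
  induction ks with
  | nil => intro D r; simp [pvSweepK]
  | cons k ks ih =>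
    intro D r
    have hstep : pvASweepStep a S (D.insert a r) k
        = D.insert a (if r.getD k 0 == 3 then r.insert k 0 else r) := by
      simp only [pvASweepStep, pvAWrite,
        PySem.Dict.getD_insert_self, PySem.Dict.insert_insert_self]
      by_cases h3 : r.getD k 0 = 3
      · simp [h3]
      · by_cases h2 : r.getD k 0 = 2 <;> simp [h3, h2]
    rw [List.foldl_cons, hstep, ih D _]
    simp [pvSweepK]

-- sweeping over the keys with live reads = sweeping over the items snapshot
theorem pvSweepKGen : ∀ (ps : List (String × Int)) (r : PySem.Dict String Int),
    r.keys.Nodup → (∀ p ∈ ps, r.get? p.1 = some p.2) → (ps.map (·.1)).Nodup →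
    pvSweepK (ps.map (·.1)) r = ps.foldl pvBSweepStep r := by
  intro ps
  induction ps with
  | nil => intro r _ _ _; rfl
  | cons p ps ih =>
    intro r hn hget hkn
    obtain ⟨k, v⟩ := p
    have hv : r.getD k 0 = v := by
      rw [PySem.Dict.getD_eq_get?_getD, hget (k, v) (List.mem_cons_self ..)]; rfl
    simp only [List.map_cons, List.nodup_cons] at hkn
    have hstep : (if r.getD k 0 == 3 then r.insert k 0 else r) = pvBSweepStep r (k, v) := by
      simp only [pvBSweepStep, hv]
    simp only [pvSweepK, List.map_cons, List.foldl_cons] at *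
    rw [hstep]
    by_cases h3 : v = 3
    · subst h3
      refine ih (r.insert k 0) (PySem.Dict.nodup_keys_insert _ _ _ hn) ?_ hkn.2
      intro q hq
      rw [PySem.Dict.get?_insert_of_ne]
      · exact hget q (List.mem_cons_of_mem _ hq)
      · intro hqk
        exact hkn.1 (hqk ▸ List.mem_map_of_mem hq)
    · have : pvBSweepStep r (k, v) = r := by simp [pvBSweepStep, h3]
      rw [this]
      exact ih r hn (fun q hq => hget q (List.mem_cons_of_mem _ hq)) hkn.2

theorem pvSweepKEq (r : PySem.Dict String Int) (hn : r.keys.Nodup) :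
    pvSweepK r.keys r = pvSweep r := by
  have hk : r.keys = r.items.map (·.1) := by simp only [PySem.Dict.keys]
  rw [pvSweep, hk]
  refine pvSweepKGen r.items r hn ?_ (hk ▸ hn)
  intro p hp
  obtain ⟨pk, pv⟩ := p
  exact PySem.Dict.get?_of_mem_items r hp hn

-- what the sweep does to each entry
theorem pvSweepGenGet? (b : String) : ∀ (ps : List (String × Int)) (r : PySem.Dict String Int),
    (∀ p ∈ ps, r.get? p.1 = some p.2) → (ps.map (·.1)).Nodup →
    (ps.foldl pvBSweepStep r).get? b = if (b, (3 : Int)) ∈ ps then some 0 else r.get? b := by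
  intro ps
  induction ps with
  | nil => intro r _ _; simp
  | cons p ps ih =>
    intro r hget hkn
    obtain ⟨k, v⟩ := p
    simp only [List.map_cons, List.nodup_cons] at hkn
    simp only [List.foldl_cons]
    by_cases h3 : v = 3
    · subst h3
      have hstep : pvBSweepStep r (k, 3) = r.insert k 0 := by simp [pvBSweepStep]
      rw [hstep, ih (r.insert k 0) ?tail ?keys]
      case tail =>
        intro q hq
        rw [PySem.Dict.get?_insert_of_ne]
        · exact hget q (List.mem_cons_of_mem _ hq)
        · intro hqk; exact hkn.1 (hqk ▸ List.mem_map_of_mem hq)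
      case keys => exact hkn.2
      by_cases hb : b = k
      · subst hb
        have hnot : (b, (3 : Int)) ∉ ps := fun hm => hkn.1 (List.mem_map_of_mem hm)
        simp [hnot, PySem.Dict.get?_insert_self]
      · have hne : ((b, (3 : Int)) = (k, 3)) = False := by simp [hb]
        simp only [List.mem_cons, hne, false_or]
        rw [PySem.Dict.get?_insert_of_ne _ _ hb]
    · have hstep : pvBSweepStep r (k, v) = r := by simp [pvBSweepStep, h3]
      rw [hstep, ih r (fun q hq => hget q (List.mem_cons_of_mem _ hq)) hkn.2]
      have hne : (b, (3 : Int)) ≠ (k, v) := by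
        intro he; exact h3 (Prod.ext_iff.mp he).2.symm
      simp [List.mem_cons, hne]

theorem pvSweepGet? (r : PySem.Dict String Int) (hn : r.keys.Nodup) (b : String) :
    (pvSweep r).get? b = if r.get? b = some 3 then some 0 else r.get? b := by
  have hk : r.keys = r.items.map (·.1) := by simp only [PySem.Dict.keys]
  rw [pvSweep, pvSweepGenGet? b r.items r
    (fun p hp => by obtain ⟨pk, pv⟩ := p; exact PySem.Dict.get?_of_mem_items r hp hn)
    (hk ▸ hn)]
  rw [if_congr (Iff.symm (PySem.Dict.get?_eq_some_iff_mem_items r b 3 hn)) rfl rfl]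

theorem pvSweepNT (r : PySem.Dict String Int) (hn : r.keys.Nodup) (b : String) :
    (pvSweep r).get? b ≠ some 3 := by
  rw [pvSweepGet? r hn b]
  split_ifs with h
  · simp
  · exact h

theorem pvSweepPres12 (r : PySem.Dict String Int) (hn : r.keys.Nodup) (b : String)
    (h : r.getD b 0 = 1 ∨ r.getD b 0 = 2) :
    (pvSweep r).getD b 0 = 1 ∨ (pvSweep r).getD b 0 = 2 := by
  have hne : r.get? b ≠ some 3 := by
    intro hq
    rw [PySem.Dict.getD_eq_get?_getD, hq] at h
    simp at h
  rw [PySem.Dict.getD_eq_get?_getD, pvSweepGet? r hn b, if_neg hne,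
    ← PySem.Dict.getD_eq_get?_getD]
  exact h

theorem pvSweepVR (r : PySem.Dict String Int) (hn : r.keys.Nodup)
    (hVR : ∀ b, r.getD b 0 = 0 ∨ r.getD b 0 = 1 ∨ r.getD b 0 = 2 ∨ r.getD b 0 = 3) (b : String) :
    (pvSweep r).getD b 0 = 0 ∨ (pvSweep r).getD b 0 = 1 ∨ (pvSweep r).getD b 0 = 2 ∨
      (pvSweep r).getD b 0 = 3 := by
  rw [PySem.Dict.getD_eq_get?_getD, pvSweepGet? r hn b]
  split_ifs with h
  · simp
  · rw [← PySem.Dict.getD_eq_get?_getD]; exact hVR b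

theorem pvSweepId (r : PySem.Dict String Int) (hn : r.keys.Nodup)
    (hNT : ∀ b, r.get? b ≠ some 3) : pvSweep r = r := by
  rw [pvSweep, PySem.List.foldl_congr_mem r.items pvBSweepStep (fun acc _ => acc) r ?_,
    PySem.List.foldl_ignore]
  intro acc p hp
  obtain ⟨pk, pv⟩ := p
  have h2 := PySem.Dict.get?_of_mem_items r hp hn
  have : pv ≠ 3 := fun h3 => hNT pk (h3 ▸ h2)
  simp [pvBSweepStep, this]

theorem pvRowStepVR (r : PySem.Dict String Int)
    (hVR : ∀ b, r.getD b 0 = 0 ∨ r.getD b 0 = 1 ∨ r.getD b 0 = 2 ∨ r.getD b 0 = 3)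
    (x b : String) :
    (pvBRowStep r x).getD b 0 = 0 ∨ (pvBRowStep r x).getD b 0 = 1 ∨
      (pvBRowStep r x).getD b 0 = 2 ∨ (pvBRowStep r x).getD b 0 = 3 := by
  by_cases hbx : b = x
  · subst hbx
    simp only [pvBRowStep]
    split_ifs <;> simp [PySem.Dict.getD_insert_self, hVR b]
  · simp only [pvBRowStep]
    split_ifs <;> simp [PySem.Dict.getD_insert_of_ne _ _ _ hbx, hVR b]

theorem pvRowAfterVR (l : List String) :
    ∀ (r : PySem.Dict String Int),
    (∀ b, r.getD b 0 = 0 ∨ r.getD b 0 = 1 ∨ r.getD b 0 = 2 ∨ r.getD b 0 = 3) →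
    ∀ b, (pvRowAfter l r).getD b 0 = 0 ∨ (pvRowAfter l r).getD b 0 = 1 ∨
      (pvRowAfter l r).getD b 0 = 2 ∨ (pvRowAfter l r).getD b 0 = 3 := by
  induction l with
  | nil => intro r h; exact h
  | cons x l ih =>
    intro r h
    exact ih (pvBRowStep r x) (pvRowStepVR r h x)

theorem pvRowStepPres12 (r : PySem.Dict String Int) (x b : String)
    (h : r.getD b 0 = 1 ∨ r.getD b 0 = 2) :
    (pvBRowStep r x).getD b 0 = 1 ∨ (pvBRowStep r x).getD b 0 = 2 := by
  by_cases hbx : b = x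
  · subst hbx
    have h0 : r.getD b 0 ≠ 0 := by rcases h with h | h <;> rw [h] <;> decide
    have h3 : r.getD b 0 ≠ 3 := by rcases h with h | h <;> rw [h] <;> decide
    simp only [pvBRowStep]
    rw [if_neg (by simpa using h0), if_neg (by simpa using h3)]
    exact h
  · simp only [pvBRowStep]
    split_ifs <;> simp [PySem.Dict.getD_insert_of_ne _ _ _ hbx, h]

theorem pvRowAfterMem (l : List String) :
    ∀ (r : PySem.Dict String Int),
    (∀ b, r.getD b 0 = 0 ∨ r.getD b 0 = 1 ∨ r.getD b 0 = 2 ∨ r.getD b 0 = 3) →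
    ∀ b ∈ l, (pvRowAfter l r).getD b 0 = 1 ∨ (pvRowAfter l r).getD b 0 = 2 := by
  induction l with
  | nil => intro r _ b hb; cases hb
  | cons x l ih =>
    intro r hVR b hb
    rcases List.mem_cons.mp hb with hbx | hbl
    · subst hbx
      have h1 : (pvBRowStep r b).getD b 0 = 1 ∨ (pvBRowStep r b).getD b 0 = 2 := by
        simp only [pvBRowStep]
        rcases hVR b with h | h | h | h <;>
          simp [h, PySem.Dict.getD_insert_self]
      have : pvRowAfter (b :: l) r = pvRowAfter l (pvBRowStep r b) := rfl
      rw [this]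
      exact pvFoldPres
        (fun r => r.getD b 0 = 1 ∨ r.getD b 0 = 2) pvBRowStep
        (fun st x hs => pvRowStepPres12 st x b hs) l (pvBRowStep r b) h1
    · exact ih (pvBRowStep r x) (pvRowStepVR r hVR x) b hbl

theorem pvRowAfterId (l : List String) :
    ∀ (r : PySem.Dict String Int),
    (∀ b ∈ l, r.getD b 0 = 1 ∨ r.getD b 0 = 2) → pvRowAfter l r = r := by
  induction l with
  | nil => intro r _; rfl
  | cons x l ih =>
    intro r h
    have hx := h x (List.mem_cons_self ..)
    have h0 : r.getD x 0 ≠ 0 := by rcases hx with h' | h' <;> rw [h'] <;> decide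
    have h3 : r.getD x 0 ≠ 3 := by rcases hx with h' | h' <;> rw [h'] <;> decide
    have hstep : pvBRowStep r x = r := by
      simp only [pvBRowStep]
      rw [if_neg (by simpa using h0), if_neg (by simpa using h3)]
    have : pvRowAfter (x :: l) r = pvRowAfter l (pvBRowStep r x) := rfl
    rw [this, hstep]
    exact ih r (fun b hb => h b (List.mem_cons_of_mem _ hb))

theorem pvInvStepP (trace : List String) (D : pvRel) (p : String × Int) (h : pvInv D) :
    pvInv (pvStepP trace D p) := by
  obtain ⟨hn, hrows⟩ := h
  constructor
  · exact PySem.Dict.nodup_keys_insert _ _ _ hn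
  · intro a
    by_cases ha : a = p.1
    · subst ha
      rw [pvStepP, PySem.Dict.getD_insert_self]
      obtain ⟨hrn, hrv⟩ := hrows p.1
      constructor
      · exact pvSweepNodup _ (pvRowAfterNodup _ _ hrn)
      · exact pvSweepVR _ (pvRowAfterNodup _ _ hrn) (pvRowAfterVR _ _ hrv)
    · rw [pvStepP, PySem.Dict.getD_insert_of_ne _ _ _ ha]
      exact hrows a

-- A's suffix step from a raw state equals the step from the insert-normal form
theorem pvSufStart (a f : String) (S : PySem.Set String) (D : pvRel) :
    pvASufStep a (S, D) f
      = pvASufStep a (S, D.insert a (D.getD a PySem.Dict.empty)) f := by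
  simp only [pvASufStep, pvARead, pvAWrite, PySem.Dict.getD_insert_self,
    PySem.Dict.insert_insert_self]

theorem pvKey (a : String) (l : List String) (D : pvRel)
    (hrn : (D.getD a PySem.Dict.empty).keys.Nodup) :
    ((l.foldl (pvASufStep a) (PySem.Set.empty, D)).2).insert a
      (((l.foldl (pvASufStep a) (PySem.Set.empty, D)).2).getD a PySem.Dict.empty)
    = D.insert a (pvRowAfter l (D.getD a PySem.Dict.empty)) := by
  cases l with
  | nil => simp [pvRowAfter]
  | cons f l' =>
    rw [List.foldl_cons, pvSufStart a f _ D, pvASufStepEq a f _ D _ hrn,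
      pvSufFactor a l' _ D _ (pvRowStepNodup _ _ hrn),
      PySem.Dict.getD_insert_self, PySem.Dict.insert_insert_self]
    rfl

theorem pvKey2 (a : String) (l : List String) (D : pvRel)
    (hrn : (D.getD a PySem.Dict.empty).keys.Nodup) :
    ((l.foldl (pvASufStep a) (PySem.Set.empty, D)).2).getD a PySem.Dict.empty
      = pvRowAfter l (D.getD a PySem.Dict.empty) := by
  have h := congrArg (fun d => d.get? a) (pvKey a l D hrn)
  simpa [PySem.Dict.get?_insert_self] using h

theorem pvAEventEq (trace : List String) (i : Int) (D : pvRel) (a : String)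
    (hg : i ≠ PySem.List.len trace) (hInv : pvInv D) :
    pvAEvent trace (i, D) a = (i + 1, pvStepP trace D (a, i)) := by
  obtain ⟨hn, hrows⟩ := hInv
  obtain ⟨hrn, _⟩ := hrows a
  have k2 := pvKey2 a (PySem.List.slice trace (some (i + 1)) none) D hrn
  have k1 := pvKey a (PySem.List.slice trace (some (i + 1)) none) D hrn
  rw [k2] at k1
  have hRn : (pvRowAfter (PySem.List.slice trace (some (i + 1)) none)
      (D.getD a PySem.Dict.empty)).keys.Nodup := pvRowAfterNodup _ _ hrn
  simp only [pvAEvent]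
  rw [if_pos hg, k2, k1, pvSweepAFactor, pvSweepKEq _ hRn]
  rfl

theorem pvATraceEnum (trace : List String) : ∀ (s : List String) (i0 : Int) (D : pvRel),
    pvInv D → i0 + (s.length : Int) ≤ PySem.List.len trace →
    s.foldl (pvAEvent trace) (i0, D)
      = (i0 + (s.length : Int), (PySem.List.enumerate s i0).foldl
          (fun D q => pvStepP trace D (q.2, q.1)) D) := by
  intro s
  induction s with
  | nil => intro i0 D _ _; simp [PySem.List.enumerate_nil]
  | cons x s ih =>
    intro i0 D hInv hle
    have hlen : PySem.List.len trace = (trace.length : Int) := rfl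
    rw [hlen] at hle
    have hg : i0 ≠ PySem.List.len trace := by
      rw [hlen]; simp only [List.length_cons] at hle; push_cast at hle ⊢; omega
    rw [List.foldl_cons, pvAEventEq trace i0 D x hg hInv, PySem.List.enumerate_cons,
      List.foldl_cons,
      ih (i0 + 1) _ (pvInvStepP trace D (x, i0) hInv)
        (by rw [hlen]; simp only [List.length_cons] at hle; push_cast at hle ⊢; omega)]
    have harith : i0 + 1 + (s.length : Int) = i0 + (((x :: s).length : Int)) := by
      simp only [List.length_cons]; push_cast; ring
    rw [harith]

theorem pvATraceEq (trace : List String) (D : pvRel) (hInv : pvInv D) :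
    pvATrace D trace = (PySem.List.enumerate trace).foldl
      (fun D q => pvStepP trace D (q.2, q.1)) D := by
  have h := pvATraceEnum trace trace 0 D hInv
    (by rw [show PySem.List.len trace = (trace.length : Int) from rfl]; omega)
  rw [pvATrace, h]

-- B's first_pos dict lists the first occurrences in order
theorem pvFirstPosItems : ∀ (ps : List (Int × String)) (d : PySem.Dict String Int),
    d.keys.Nodup →
    (ps.foldl (fun d q => if d.contains q.2 then d else d.insert q.2 q.1) d).items
      = d.items ++ pvFirstNew ps d.keys := by
  intro ps
  induction ps with
  | nil => intro d _; simp [pvFirstNew]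
  | cons p ps ih =>
    intro d hn
    obtain ⟨i, a⟩ := p
    simp only [List.foldl_cons, pvFirstNew]
    by_cases hc : d.contains a = true
    · rw [if_pos hc, ih d hn, if_pos ((PySem.Dict.contains_iff_mem_keys d a).mp hc)]
    · have hc' : d.contains a = false := by simpa using hc
      have hnm : a ∉ d.keys := fun hm =>
        (by simpa [hc'] using (PySem.Dict.contains_iff_mem_keys d a).mpr hm)
      rw [if_neg (by simp [hc']), ih (d.insert a i) (PySem.Dict.nodup_keys_insert _ _ _ hn),
        PySem.Dict.items_insert_of_not_contains d i hc',
        PySem.Dict.keys_insert_of_not_contains d i hc', if_neg hnm]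
      simp

theorem pvBBodyEq (trace : List String) (rel : pvRel) (p : String × Int) :
    (rel.setdefault p.1 PySem.Dict.empty).insert p.1
      (((PySem.List.slice trace (some (p.2 + 1)) none).foldl pvBRowStep
          ((rel.setdefault p.1 PySem.Dict.empty).getD p.1 PySem.Dict.empty)).items.foldl
        pvBSweepStep
        ((PySem.List.slice trace (some (p.2 + 1)) none).foldl pvBRowStep
          ((rel.setdefault p.1 PySem.Dict.empty).getD p.1 PySem.Dict.empty)))
      = pvStepP trace rel p := by
  by_cases hc : rel.contains p.1 = true
  · simp only [PySem.Dict.setdefault_of_contains rel _ hc, pvStepP, pvRowAfter, pvSweep]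
  · have hc' : rel.contains p.1 = false := by simpa using hc
    simp only [PySem.Dict.setdefault_of_not_contains rel _ hc',
      PySem.Dict.getD_insert_self, PySem.Dict.insert_insert_self,
      PySem.Dict.getD_of_not_contains rel _ hc', pvStepP, pvRowAfter, pvSweep]

theorem pvBTraceEq (trace : List String) (rel : pvRel) :
    pvBTrace rel trace
      = (pvFirstNew (PySem.List.enumerate trace) []).foldl (pvStepP trace) rel := by
  simp only [pvBTrace]
  rw [PySem.List.foldl_congr_mem _ _ (pvStepP trace) rel
    (fun acc p _ => pvBBodyEq trace acc p)]
  rw [pvFirstPosItems (PySem.List.enumerate trace) PySem.Dict.empty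
    PySem.Dict.nodup_keys_empty]
  simp only [PySem.Dict.keys_empty, List.foldl_append]
  rfl

theorem pvSliceSub (trace : List String) (i j : Int) (h0 : 0 ≤ i) (hij : i ≤ j) (b : String)
    (hb : b ∈ PySem.List.slice trace (some (j + 1)) none) :
    b ∈ PySem.List.slice trace (some (i + 1)) none := by
  rw [PySem.List.slice_from trace (by omega : (0:Int) ≤ j + 1)] at hb
  rw [PySem.List.slice_from trace (by omega : (0:Int) ≤ i + 1)]
  have hds : List.drop (j + 1).toNat trace
      = List.drop ((j + 1).toNat - (i + 1).toNat) (List.drop (i + 1).toNat trace) := by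
    rw [List.drop_drop]; congr 1; omega
  rw [hds] at hb
  exact List.mem_of_mem_drop hb

-- the state of an activity already processed in this trace: nothing left to learn
def pvGood (trace : List String) (D : pvRel) (a : String) (ps : List (Int × String)) : Prop :=
  D.contains a = true ∧ (∀ b, (D.getD a PySem.Dict.empty).get? b ≠ some 3) ∧
  ∀ q ∈ ps, ∀ b ∈ PySem.List.slice trace (some (q.1 + 1)) none,
    (D.getD a PySem.Dict.empty).getD b 0 = 1 ∨ (D.getD a PySem.Dict.empty).getD b 0 = 2

-- repeated occurrences are identity steps: the fold collapses to the first occurrences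
theorem pvElim (trace : List String) : ∀ (ps : List (Int × String)) (seen : List String)
    (D : pvRel), List.Pairwise (fun p q => p.1 < q.1) ps → (∀ p ∈ ps, 0 ≤ p.1) → pvInv D →
    (∀ a ∈ seen, pvGood trace D a ps) →
    ps.foldl (fun D q => pvStepP trace D (q.2, q.1)) D
      = (pvFirstNew ps seen).foldl (pvStepP trace) D := by
  intro ps
  induction ps with
  | nil => intro seen D _ _ _ _; rfl
  | cons p ps ih =>
    intro seen D hpw hpos hInv hseen
    obtain ⟨i, a⟩ := p
    rw [List.pairwise_cons] at hpw
    simp only [List.foldl_cons, pvFirstNew]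
    by_cases hmem : a ∈ seen
    · rw [if_pos hmem]
      obtain ⟨hc, hNT, hval⟩ := hseen a hmem
      have hRid : pvStepP trace D (a, i) = D := by
        rw [pvStepP,
          pvRowAfterId _ _ (fun b hb => hval (i, a) (List.mem_cons_self ..) b hb),
          pvSweepId _ (hInv.2 a).1 hNT]
        exact pvInsertGetDSelf D a _ hc hInv.1
      rw [hRid]
      exact ih seen D hpw.2 (fun q hq => hpos q (List.mem_cons_of_mem _ hq)) hInv
        (fun a' ha' => ⟨(hseen a' ha').1, (hseen a' ha').2.1,
          fun q hq => (hseen a' ha').2.2 q (List.mem_cons_of_mem _ hq)⟩)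
    · rw [if_neg hmem, List.foldl_cons]
      have hi0 : (0 : Int) ≤ i := hpos (i, a) (List.mem_cons_self ..)
      refine ih (seen ++ [a]) (pvStepP trace D (a, i)) hpw.2
        (fun q hq => hpos q (List.mem_cons_of_mem _ hq))
        (pvInvStepP trace D (a, i) hInv) ?_
      intro a' ha'
      rcases List.mem_append.mp ha' with hold | hnew
      · have hne : a' ≠ a := fun he => hmem (he ▸ hold)
        obtain ⟨hc, hNT, hval⟩ := hseen a' hold
        refine ⟨?_, ?_, ?_⟩
        · rw [pvStepP, PySem.Dict.contains_insert]
          simp [hc]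
        · rw [pvStepP, PySem.Dict.getD_insert_of_ne _ _ _ hne]
          exact hNT
        · rw [pvStepP]
          intro q hq b hb
          rw [PySem.Dict.getD_insert_of_ne _ _ _ hne]
          exact hval q (List.mem_cons_of_mem _ hq) b hb
      · have ha : a' = a := by simpa using hnew
        subst ha
        have hrn : (D.getD a' PySem.Dict.empty).keys.Nodup := (hInv.2 a').1
        have hRAn : (pvRowAfter (PySem.List.slice trace (some (i + 1)) none)
            (D.getD a' PySem.Dict.empty)).keys.Nodup := pvRowAfterNodup _ _ hrn
        refine ⟨?_, ?_, ?_⟩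
        · rw [pvStepP]
          exact PySem.Dict.contains_insert_self _ _ _
        · rw [pvStepP, PySem.Dict.getD_insert_self]
          exact fun b => pvSweepNT _ hRAn b
        · rw [pvStepP, PySem.Dict.getD_insert_self]
          intro q hq b hb
          have hiq : i < q.1 := hpw.1 q hq
          have hb' : b ∈ PySem.List.slice trace (some (i + 1)) none :=
            pvSliceSub trace i q.1 hi0 (le_of_lt hiq) b hb
          exact pvSweepPres12 _ hRAn b
            (pvRowAfterMem _ _ (hInv.2 a').2 b hb')

theorem pvTraceEq (trace : List String) (D : pvRel) (hInv : pvInv D) :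
    pvATrace D trace = pvBTrace D trace := by
  rw [pvATraceEq trace D hInv, pvBTraceEq trace D]
  refine pvElim trace (PySem.List.enumerate trace) [] D
    (PySem.List.pairwise_lt_enumerate trace 0) ?_ hInv (by simp)
  intro p hp
  obtain ⟨k, hk, hpk⟩ := (PySem.List.mem_enumerate_iff trace 0 p).mp hp
  rw [hpk]
  simp

theorem pvInvBTrace (trace : List String) (D : pvRel) (hInv : pvInv D) :
    pvInv (pvBTrace D trace) := by
  rw [pvBTraceEq]
  exact pvFoldPres pvInv (pvStepP trace) (fun D p h => pvInvStepP trace D p h) _ D hInv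

-- the initial all-3 table
def pvRow0 (alphabet : List String) : PySem.Dict String Int :=
  alphabet.foldl (fun r b => r.insert b 3) PySem.Dict.empty

theorem pvRow0GetGen (alphabet : List String) : ∀ (r : PySem.Dict String Int) (b : String),
    (alphabet.foldl (fun r b => r.insert b (3 : Int)) r).get? b
      = if b ∈ alphabet then some 3 else r.get? b := by
  induction alphabet with
  | nil => intro r b; simp
  | cons c l ih =>
    intro r b
    rw [List.foldl_cons, ih]
    by_cases hbl : b ∈ l
    · simp [hbl]
    · by_cases hbc : b = c
      · subst hbc; simp [hbl, PySem.Dict.get?_insert_self]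
      · simp [hbl, hbc, PySem.Dict.get?_insert_of_ne _ _ hbc]

theorem pvRow0OK (alphabet : List String) : pvRowOK (pvRow0 alphabet) := by
  constructor
  · show (alphabet.foldl (fun r b => r.insert b (3 : Int)) PySem.Dict.empty).keys.Nodup
    exact pvFoldPres (fun (r : PySem.Dict String Int) => r.keys.Nodup)
      (fun r b => r.insert b (3 : Int))
      (fun r b h => PySem.Dict.nodup_keys_insert _ _ _ h) alphabet PySem.Dict.empty
      PySem.Dict.nodup_keys_empty
  · intro b
    rw [PySem.Dict.getD_eq_get?_getD, pvRow0, pvRow0GetGen]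
    split_ifs <;> simp

theorem pvWriteFactor (a : String) (bs : List String) : ∀ (D : pvRel)
    (r : PySem.Dict String Int),
    bs.foldl (fun D b => pvAWrite D a b 3) (D.insert a r)
      = D.insert a (bs.foldl (fun r b => r.insert b (3 : Int)) r) := by
  induction bs with
  | nil => intros; rfl
  | cons b bs ih =>
    intro D r
    rw [List.foldl_cons, show pvAWrite (D.insert a r) a b 3
        = D.insert a (r.insert b 3) from by
      simp only [pvAWrite, PySem.Dict.getD_insert_self, PySem.Dict.insert_insert_self],
      ih, List.foldl_cons]

theorem pvRow0Idem (alphabet : List String) : ∀ (l : List String),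
    (∀ b ∈ l, b ∈ alphabet) →
    l.foldl (fun r b => r.insert b (3 : Int)) (pvRow0 alphabet) = pvRow0 alphabet := by
  intro l
  induction l with
  | nil => intro _; rfl
  | cons b l ih =>
    intro h
    have hb : (pvRow0 alphabet).get? b = some 3 := by
      rw [pvRow0, pvRow0GetGen, if_pos (h b (List.mem_cons_self ..))]
    rw [List.foldl_cons, pvInsertSelf _ _ _ hb (pvRow0OK alphabet).1]
    exact ih (fun c hc => h c (List.mem_cons_of_mem _ hc))

theorem pvInitStep (alphabet : List String) (hne : alphabet ≠ []) (D : pvRel) (a : String)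
    (hP : ∀ a', D.contains a' = true → D.getD a' PySem.Dict.empty = pvRow0 alphabet) :
    alphabet.foldl (fun D b => pvAWrite D a b 3) D = D.insert a (pvRow0 alphabet) := by
  obtain ⟨c, bs, halpha⟩ := List.exists_cons_of_ne_nil hne
  subst halpha
  rw [List.foldl_cons, show pvAWrite D a c 3
      = D.insert a ((D.getD a PySem.Dict.empty).insert c 3) from rfl, pvWriteFactor]
  by_cases hc : D.contains a = true
  · rw [hP a hc]
    have h2 := pvRow0Idem (c :: bs) (c :: bs) (fun b hb => hb)
    rw [List.foldl_cons] at h2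
    rw [h2]
  · have hc' : D.contains a = false := by simpa using hc
    rw [PySem.Dict.getD_of_not_contains D _ hc']
    rfl

theorem pvInvInsertRow (D : pvRel) (hInv : pvInv D) (a : String)
    (r : PySem.Dict String Int) (hOK : pvRowOK r) : pvInv (D.insert a r) := by
  refine ⟨PySem.Dict.nodup_keys_insert _ _ _ hInv.1, ?_⟩
  intro a'
  by_cases ha : a' = a
  · subst ha; rw [PySem.Dict.getD_insert_self]; exact hOK
  · rw [PySem.Dict.getD_insert_of_ne _ _ _ ha]; exact hInv.2 a'

theorem pvInitGen (alphabet : List String) (hne : alphabet ≠ []) :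
    ∀ (l : List String) (D : pvRel),
    (∀ a', D.contains a' = true → D.getD a' PySem.Dict.empty = pvRow0 alphabet) →
    l.foldl (fun D a => alphabet.foldl (fun D b => pvAWrite D a b 3) D) D
      = l.foldl (fun rel a => rel.insert a (pvRow0 alphabet)) D := by
  intro l
  induction l with
  | nil => intros; rfl
  | cons a l ih =>
    intro D hP
    rw [List.foldl_cons, List.foldl_cons, pvInitStep alphabet hne D a hP]
    refine ih _ ?_
    intro a' hc'
    by_cases ha : a' = a
    · subst ha; rw [PySem.Dict.getD_insert_self]
    · rw [PySem.Dict.getD_insert_of_ne _ _ _ ha]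
      rw [PySem.Dict.contains_insert] at hc'
      have : D.contains a' = true := by
        simpa [show (a' == a) = false by simpa using ha] using hc'
      exact hP a' this

theorem pvInitAll (alphabet : List String) :
    alphabet.foldl (fun D a => alphabet.foldl (fun D b => pvAWrite D a b 3) D)
        PySem.Dict.empty
      = alphabet.foldl (fun rel a => rel.insert a (pvRow0 alphabet)) PySem.Dict.empty
    ∧ pvInv (alphabet.foldl (fun rel a => rel.insert a (pvRow0 alphabet))
        PySem.Dict.empty) := by
  constructor
  · cases halpha : alphabet with
    | nil => rfl
    | cons c bs =>
      rw [← halpha]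
      refine pvInitGen alphabet (by rw [halpha]; simp) alphabet PySem.Dict.empty ?_
      intro a' hc'
      rw [show (PySem.Dict.empty : pvRel).contains a' = false from rfl] at hc'
      cases hc'
  · refine pvFoldPres pvInv _ ?_ alphabet PySem.Dict.empty ?_
    · intro D a h
      exact pvInvInsertRow D h a _ (pvRow0OK alphabet)
    · exact ⟨PySem.Dict.nodup_keys_empty, fun a => by
        rw [PySem.Dict.getD_empty]
        exact ⟨PySem.Dict.nodup_keys_empty, fun b => by rw [PySem.Dict.getD_empty]; simp⟩⟩

theorem pvLogFold (log : List (List String)) : ∀ (D : pvRel), pvInv D →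
    log.foldl pvATrace D = log.foldl pvBTrace D := by
  induction log with
  | nil => intros; rfl
  | cons t log ih =>
    intro D hInv
    rw [List.foldl_cons, List.foldl_cons, pvTraceEq t D hInv]
    exact ih _ (pvInvBTrace t D hInv)

-- ===== VERDICT (by name: the statement is the Claim_ definition above) =====
theorem get_eventual_follows_relations_between_activities_dict_spec : Claim_equal_get_eventual_follows_relations_between_activities_dict := by
  intro log alphabet _
  unfold Spec_get_eventual_follows_relations_between_activities_dict
  obtain ⟨hEq, hInv⟩ := pvInitAll alphabet
  simp only [get_eventual_follows_relations_between_activities_dict,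
    get_eventual_follows_relations_between_activities_dict_alt]
  rw [hEq, pvLogFold log _ hInv]
  rfl
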